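-- pv_equiv track=rewrite | github.com/venysssssssssss/extract-on-demand-sp | exemplo_sap_gui_export.py | _count_duplicates_by_normalized_key
-- ===== SOURCE A (Python) =====
-- import unicodedata
--
-- def _normalize_header_key(value: str) -> str:
--     normalized = unicodedata.normalize("NFKD", _strip_invisible_characters(str(value)))
--     without_accents = "".join(ch for ch in normalized if not unicodedata.combining(ch))
--     compact = " ".join(without_accents.strip().casefold().split())
--     return compact
--
-- def _strip_invisible_characters(value: str) -> str:
--     text = str(value)
--     if text.isascii() and "\ufeff" not in text and "\xa0" not in text:
--         return text
--     if "\ufeff" in text or "\xa0" in text: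
--         text = text.replace("\ufeff", "").replace("\xa0", " ")
--     if text.isascii():
--         return text
--     cleaned: list[str] = []
--     for char in text:
--         if unicodedata.category(char) == "Cf":
--             continue
--         cleaned.append(char)
--     return "".join(cleaned)
--
-- def _count_duplicates_by_normalized_key(values: list[str]) -> int:
--     seen: set[str] = set()
--     duplicates = 0
--     for value in values:
--         key = _normalize_header_key(value)
--         if not key:
--             continue
--         if key in seen:
--             duplicates += 1
--             continue
--         seen.add(key)
--     return duplicates
-- ===== SOURCE B (Python) =====
-- import unicodedata
--
--
-- def _normalize_header_key(value: str) -> str: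
--     normalized = unicodedata.normalize("NFKD", _strip_invisible_characters(str(value)))
--     without_accents = "".join(ch for ch in normalized if not unicodedata.combining(ch))
--     compact = " ".join(without_accents.strip().casefold().split())
--     return compact
--
--
-- def _strip_invisible_characters(value: str) -> str:
--     text = str(value)
--     if text.isascii() and "\ufeff" not in text and "\xa0" not in text:
--         return text
--     if "\ufeff" in text or "\xa0" in text:
--         text = text.replace("\ufeff", "").replace("\xa0", " ")
--     if text.isascii():
--         return text
--     cleaned: list[str] = []
--     for char in text:
--         if unicodedata.category(char) == "Cf":
--             continue
--         cleaned.append(char)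
--     return "".join(cleaned)
--
--
-- def _count_duplicates_by_normalized_key(values: list[str]) -> int:
--     # Sort the non-empty normalized keys; every duplicate occurrence then sits
--     # next to an equal neighbour, so the answer is the number of adjacent equal pairs.
--     keys = sorted(key for key in map(_normalize_header_key, values) if key)
--     return sum(1 for a, b in zip(keys, keys[1:]) if a == b)
-- ===== Notes on version B (the rewrite author's own statement) =====
-- stated objective: alternative
-- what changed: Replaces A's single pass with an incrementally maintained seen-set by a sort-then-scan algorithm: sort the non-empty normalized keys so equal keys become adjacent, then count adjacent equal pairs with zip(keys, keys[1:]).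
import Mathlib
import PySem

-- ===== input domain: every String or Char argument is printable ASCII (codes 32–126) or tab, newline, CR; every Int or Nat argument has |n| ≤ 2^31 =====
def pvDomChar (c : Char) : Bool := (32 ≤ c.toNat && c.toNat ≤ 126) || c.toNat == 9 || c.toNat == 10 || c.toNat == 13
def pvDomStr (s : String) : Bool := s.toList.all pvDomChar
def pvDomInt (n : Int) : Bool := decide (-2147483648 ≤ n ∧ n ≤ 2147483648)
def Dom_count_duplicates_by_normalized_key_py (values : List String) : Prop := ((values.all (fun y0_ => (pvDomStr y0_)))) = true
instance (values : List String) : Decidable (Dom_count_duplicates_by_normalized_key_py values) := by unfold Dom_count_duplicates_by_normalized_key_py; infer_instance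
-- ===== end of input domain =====

-- B replaces A's incremental seen-set loop by a sort-then-scan algorithm: sort the
-- non-empty normalized keys and count adjacent equal pairs (objective: alternative).

-- ===== PORT A =====
-- _strip_invisible_characters: on the stated ASCII domain (printable ASCII + tab/newline/CR)
-- text.isascii() is True and '\ufeff'/'\xa0' never occur, so the first branch returns text
-- unchanged; exact as the identity on Dom.
def stripInvisibleCharacters_py (s : String) : String := s

-- _normalize_header_key: on the ASCII domain NFKD is the identity and no character is
-- combining, so the unicodedata steps are identities; casefold equals lower on ASCII.
-- strip, lower, split() and ' '.join are the PySem primitives; exact on Dom.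
def normalizeHeaderKey_py (s : String) : String :=
  PySem.Str.join " " (PySem.Str.split₀ (PySem.Str.lower (PySem.Str.strip (stripInvisibleCharacters_py s))))

-- the loop body of A: state (seen, duplicates)
def cdLoopA (st : PySem.Set String × Int) (v : String) : PySem.Set String × Int :=
  let key := normalizeHeaderKey_py v
  if key = "" then st
  else if PySem.Set.contains st.1 key then (st.1, st.2 + 1)
  else (PySem.Set.add st.1 key, st.2)

def count_duplicates_by_normalized_key_py (values : List String) : Int :=
  (values.foldl cdLoopA (PySem.Set.empty, 0)).2

-- ===== PORT B =====
-- keys = sorted(non-empty normalized keys)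
def sortedKeys_py (values : List String) : List String :=
  PySem.List.sorted ((values.map normalizeHeaderKey_py).filter (fun k => k ≠ "")) (fun x => x) false

def count_duplicates_by_normalized_key_py_alt (values : List String) : Int :=
  ((((sortedKeys_py values).zip (PySem.List.slice (sortedKeys_py values) (some 1) none)).countP (fun p => p.1 == p.2) : Nat) : Int)

-- ===== PRECONDITION & SPEC =====
def Spec_count_duplicates_by_normalized_key_py (values : List String) (out : Int) : Prop := out = count_duplicates_by_normalized_key_py_alt values
instance (values : List String) (out : Int) : Decidable (Spec_count_duplicates_by_normalized_key_py values out) := by unfold Spec_count_duplicates_by_normalized_key_py; infer_instance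

-- ===== CLAIM (what is proved, stated in full; the proofs are below) =====
def Claim_equal_count_duplicates_by_normalized_key_py : Prop := ∀ (values : List String), Dom_count_duplicates_by_normalized_key_py values → Spec_count_duplicates_by_normalized_key_py values (count_duplicates_by_normalized_key_py values)

-- ===== LEMMAS AND PROOFS =====

-- the fold over values skips empty keys: it equals a fold over the filtered key list
def cdStep (st : PySem.Set String × Int) (k : String) : PySem.Set String × Int :=
  if PySem.Set.contains st.1 k then (st.1, st.2 + 1) else (PySem.Set.add st.1 k, st.2)

lemma cdLoopA_eq (st : PySem.Set String × Int) (v : String) :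
    cdLoopA st v
      = if normalizeHeaderKey_py v = "" then st else cdStep st (normalizeHeaderKey_py v) := by
  simp only [cdLoopA, cdStep]

set_option maxHeartbeats 1000000 in
lemma foldA_eq_foldKeys (values : List String) (st : PySem.Set String × Int) :
    values.foldl cdLoopA st
      = (((values.map normalizeHeaderKey_py).filter (fun k => k ≠ "")).foldl cdStep st) := by
  induction values generalizing st with
  | nil => simp
  | cons v vs ih =>
      simp only [List.foldl_cons, List.map_cons, List.filter_cons]
      rw [cdLoopA_eq]
      by_cases h : normalizeHeaderKey_py v = ""
      · rw [if_pos h]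
        simp only [h, ne_eq, not_true_eq_false, decide_false]
        exact ih st
      · rw [if_neg h]
        simp only [ne_eq, h, not_false_eq_true, decide_true]
        exact ih _

-- A's loop counts length minus newly-seen distinct keys
lemma foldKeys_snd (ks : List String) (seen : PySem.Set String) (dup : Int) :
    (ks.foldl cdStep (seen, dup)).2
      = dup + ks.length - (PySem.Set.update seen ks).length + seen.length := by
  induction ks generalizing seen dup with
  | nil => simp [PySem.Set.update_nil]
  | cons k ks ih =>
      simp only [List.foldl_cons, PySem.Set.update_cons, cdStep]
      by_cases h : k ∈ seen
      · rw [if_pos (by simpa [PySem.Set.contains_iff] using h)]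
        rw [ih, PySem.Set.add_of_mem h]
        push_cast [List.length_cons]; ring
      · rw [if_neg (by simpa [PySem.Set.contains_iff] using h)]
        rw [ih, PySem.Set.add_of_not_mem h]
        push_cast [List.length_cons, List.length_append, List.length_nil]; ring

-- on a ≤-sorted list, adjacent equal pairs + distinct elements = length
lemma adj_count_sorted (s : List String) (h : s.Pairwise (· ≤ ·)) :
    (s.zip s.tail).countP (fun p => p.1 == p.2) + s.dedup.length = s.length := by
  induction s with
  | nil => simp
  | cons a t ih =>
      cases t with
      | nil => simp
      | cons b u =>
          have h1 : a ≤ b ∧ ∀ x ∈ u, a ≤ x := by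
            have := (List.pairwise_cons.1 h).1
            exact ⟨this b (by simp), fun x hx => this x (by simp [hx])⟩
          have h2 : (b :: u).Pairwise (· ≤ ·) := (List.pairwise_cons.1 h).2
          have ih' := ih h2
          simp only [List.tail_cons] at ih'
          simp only [List.tail_cons, List.zip_cons_cons, List.countP_cons]
          by_cases hab : a = b
          · have hmem : a ∈ b :: u := by simp [hab]
            rw [List.dedup_cons_of_mem hmem]
            have hb : ((fun p => p.1 == p.2) (a, b) = true) := by simp [hab]
            rw [if_pos hb]
            rw [List.length_cons (a := a), ← ih']
            omega
          · have hmem : a ∉ b :: u := by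
              intro hma
              rcases List.mem_cons.1 hma with he | hu
              · exact hab he
              · have hba : b ≤ a := (List.pairwise_cons.1 h2).1 a hu
                exact hab (le_antisymm h1.1 hba)
            rw [List.dedup_cons_of_notMem hmem]
            have hb : ¬ ((fun p => p.1 == p.2) (a, b) = true) := by simp [hab]
            rw [if_neg hb]
            rw [List.length_cons (a := a) (as := (b :: u).dedup),
              List.length_cons (a := a) (as := b :: u), ← ih']
            omega

-- two Nodup lists with the same members have the same length
lemma nodup_same_mem_length (l1 l2 : List String) (h1 : l1.Nodup) (h2 : l2.Nodup)
    (hm : ∀ a, a ∈ l1 ↔ a ∈ l2) : l1.length = l2.length := by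
  rw [← List.toFinset_card_of_nodup h1, ← List.toFinset_card_of_nodup h2]
  congr 1
  ext a
  simp [hm a]

-- B equals length minus number of distinct keys
lemma alt_eq (values : List String) :
    count_duplicates_by_normalized_key_py_alt values
      = (((values.map normalizeHeaderKey_py).filter (fun k => k ≠ "")).length : Int)
        - ((PySem.Set.ofList ((values.map normalizeHeaderKey_py).filter (fun k => k ≠ ""))).length : Int) := by
  unfold count_duplicates_by_normalized_key_py_alt sortedKeys_py
  set ks := (values.map normalizeHeaderKey_py).filter (fun k => k ≠ "") with hks
  set s := PySem.List.sorted ks (fun x => x) false with hs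
  rw [PySem.List.slice_from_one]
  have hsorted : s.Pairwise (· ≤ ·) := by
    have := PySem.List.sorted_pairwise ks (fun x => x)
    simpa using this
  have hadj := adj_count_sorted s hsorted
  have hlen : s.length = ks.length := PySem.List.length_sorted ks (fun x => x) false
  have hded : s.dedup.length = (PySem.Set.ofList ks).length := by
    apply nodup_same_mem_length _ _ (List.nodup_dedup s) (PySem.Set.nodup_ofList ks)
    intro a
    rw [List.mem_dedup, PySem.Set.mem_ofList]
    exact PySem.List.mem_sorted ks (fun x => x) false a
  omega

-- ===== VERDICT (by name: the statement is the Claim_ definition above) =====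
theorem count_duplicates_by_normalized_key_py_spec : Claim_equal_count_duplicates_by_normalized_key_py := by
  intro values _
  unfold Spec_count_duplicates_by_normalized_key_py
  rw [alt_eq]
  unfold count_duplicates_by_normalized_key_py
  rw [foldA_eq_foldKeys, foldKeys_snd]
  have he : PySem.Set.empty = ([] : List String) := rfl
  rw [he, PySem.Set.update_nil_left]
  simp
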